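-- pv_equiv track=rewrite | github.com/vvrmahendra/DS-AlgoPrac | binarySearch/hireCandidates.py | solve
-- ===== SOURCE A (Python) =====
-- def solve(A, B):
--     def helper(A, val, target):
--         B = [A[i]+(i+1)*val for i in range(len(A))]
--         B.sort()
--         return [True,sum(B[:val])] if sum(B[:val]) <= target else [False, -1]
--
--     left, right = 0, A
--     ans = [None, None]
--     while left <= right:
--         mid = (left+right)//2
--         temp = helper(B, mid, A)
--         if temp[0]:
--             ans = [mid,temp[1] ]
--             left = mid+1
--         else:
--             right = mid-1
--
--     return ans
-- ===== SOURCE B (Python) =====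
-- def solve(A, B):
--     # Same binary search over the answer, but the cost of hiring `mid` candidates is
--     # computed by iterative quickselect-style partitioning (expected O(n)) instead of
--     # a full sort of the weighted costs.
--     def sum_smallest(xs, k):
--         # sum of the k smallest elements of xs (all of them if k >= len(xs))
--         acc = 0
--         while True:
--             if k <= 0:
--                 return acc
--             if k >= len(xs):
--                 return acc + sum(xs)
--             pivot = xs[len(xs) // 2]
--             lt = [x for x in xs if x < pivot]
--             eq = [x for x in xs if x == pivot]
--             gt = [x for x in xs if x > pivot]
--             if k <= len(lt):
--                 xs = lt
--             elif k <= len(lt) + len(eq):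
--                 return acc + sum(lt) + (k - len(lt)) * pivot
--             else:
--                 acc += sum(lt) + sum(eq)
--                 xs = gt
--                 k -= len(lt) + len(eq)
--
--     left, right = 0, A
--     ans = [None, None]
--     while left <= right:
--         mid = (left + right) // 2
--         costs = [B[i] + (i + 1) * mid for i in range(len(B))]
--         s = sum_smallest(costs, mid)
--         if s <= A:
--             ans = [mid, s]
--             left = mid + 1
--         else:
--             right = mid - 1
--     return ans
-- ===== Notes on version B (the rewrite author's own statement) =====
-- stated objective: alternative
-- what changed: Each binary-search probe computes the sum of the mid smallest weighted costs by an iterative quickselect-style three-way partitioning loop instead of fully sorting the cost array and summing a prefix.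
import Mathlib
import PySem

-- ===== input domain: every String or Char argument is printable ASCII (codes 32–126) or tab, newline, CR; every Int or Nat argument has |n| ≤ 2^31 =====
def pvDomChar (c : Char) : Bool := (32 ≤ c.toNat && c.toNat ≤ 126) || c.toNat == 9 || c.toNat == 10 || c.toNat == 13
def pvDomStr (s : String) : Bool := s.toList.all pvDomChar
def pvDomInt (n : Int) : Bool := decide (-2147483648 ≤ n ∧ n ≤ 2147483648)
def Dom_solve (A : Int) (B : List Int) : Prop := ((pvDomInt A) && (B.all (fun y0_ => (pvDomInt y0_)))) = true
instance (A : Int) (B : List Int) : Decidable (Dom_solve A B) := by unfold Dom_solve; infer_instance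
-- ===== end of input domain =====

-- B replaces the full sort inside each binary-search probe with quickselect-style
-- partitioning (alternative algorithm; not claimed faster in wall-clock).

-- ===== PORT A =====
-- helper(B, val, target) from A: build weighted costs, full sort, sum the prefix of length val
def helperA (Bl : List Int) (val target : Int) : Bool × Int :=
  let c := (List.range Bl.length).map (fun i => Bl.getD i 0 + ((i : Int) + 1) * val)
  let s := PySem.List.sorted c (fun x => x) false
  if (PySem.List.slice s (some 0) (some val)).sum ≤ target then
    (true, (PySem.List.slice s (some 0) (some val)).sum)
  else (false, -1)

-- the while-loop of A (binary search on [left, right])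
def loopA (Bl : List Int) (A : Int) (left right : Int) (ans : Option Int × Option Int) :
    Option Int × Option Int :=
  if h : left ≤ right then
    let mid := PySem.Int.floordiv (left + right) 2
    if (helperA Bl mid A).1 then loopA Bl A (mid + 1) right (some mid, some (helperA Bl mid A).2)
    else loopA Bl A left (mid - 1) ans
  else ans
termination_by (right + 1 - left).toNat
decreasing_by
  · have := PySem.Int.floordiv_two_mid_bounds h
    omega
  · have := PySem.Int.floordiv_two_mid_bounds h
    omega

def solve (A : Int) (B : List Int) : List (Option Int) :=
  let r := loopA B A 0 A (none, none)
  [r.1, r.2]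

-- ===== PORT B =====
-- iterative quickselect-style partial selection: sum of the k smallest elements of xs
def sumSmallest (xs : List Int) (k : Int) (acc : Int) : Int :=
  if k ≤ 0 then acc
  else if (xs.length : Int) ≤ k then acc + xs.sum
  else
    let pivot := xs.getD (xs.length / 2) 0
    let lt := xs.filter (fun x => decide (x < pivot))
    let eq := xs.filter (fun x => x == pivot)
    let gt := xs.filter (fun x => decide (pivot < x))
    if k ≤ (lt.length : Int) then sumSmallest lt k acc
    else if k ≤ (lt.length : Int) + eq.length then acc + lt.sum + (k - lt.length) * pivot
    else sumSmallest gt (k - lt.length - eq.length) (acc + lt.sum + eq.sum)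
termination_by xs.length
decreasing_by
  all_goals
  · have hx : xs.length / 2 < xs.length := by omega
    have hm : xs.getD (xs.length / 2) 0 ∈ xs := by
      rw [List.getD_eq_getElem _ _ hx]; exact List.getElem_mem hx
    simp only [List.length_unattach]
    refine lt_of_lt_of_le
      (List.length_filter_lt_length_iff_exists.mpr ⟨⟨_, hm⟩, List.mem_attach _ _, ?_⟩) ?_
    · simp
    · simp

-- the while-loop of B
def loopB (Bl : List Int) (A : Int) (left right : Int) (ans : Option Int × Option Int) :
    Option Int × Option Int :=
  if h : left ≤ right then
    let mid := PySem.Int.floordiv (left + right) 2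
    let costs := (List.range Bl.length).map (fun i => Bl.getD i 0 + ((i : Int) + 1) * mid)
    let s := sumSmallest costs mid 0
    if s ≤ A then loopB Bl A (mid + 1) right (some mid, some s)
    else loopB Bl A left (mid - 1) ans
  else ans
termination_by (right + 1 - left).toNat
decreasing_by
  · have := PySem.Int.floordiv_two_mid_bounds h
    omega
  · have := PySem.Int.floordiv_two_mid_bounds h
    omega

def solve_alt (A : Int) (B : List Int) : List (Option Int) :=
  let r := loopB B A 0 A (none, none)
  [r.1, r.2]

-- ===== PRECONDITION & SPEC =====
def Spec_solve (A : Int) (B : List Int) (out : List (Option Int)) : Prop := out = solve_alt A B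
instance (A : Int) (B : List Int) (out : List (Option Int)) : Decidable (Spec_solve A B out) := by unfold Spec_solve; infer_instance

-- ===== CLAIM (what is proved, stated in full; the proofs are below) =====
def Claim_equal_solve : Prop := ∀ (A : Int) (B : List Int), Dom_solve A B → Spec_solve A B (solve A B)

-- ===== LEMMAS AND PROOFS =====

-- every element of the `== pivot` filter is pivot
theorem eq_filter_replicate (xs : List Int) (pivot : Int) :
    xs.filter (fun x => x == pivot) =
      List.replicate (xs.filter (fun x => x == pivot)).length pivot := by
  apply List.eq_replicate_of_mem
  intro b hb
  have := (List.mem_filter.mp hb).2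
  simpa using this

-- sorted xs splits as sorted(<pivot) ++ (==pivot) ++ sorted(>pivot)
theorem sorted_partition (xs : List Int) (pivot : Int) :
    PySem.List.sorted xs (fun x => x) false =
      PySem.List.sorted (xs.filter (fun x => decide (x < pivot))) (fun x => x) false
        ++ xs.filter (fun x => x == pivot)
        ++ PySem.List.sorted (xs.filter (fun x => decide (pivot < x))) (fun x => x) false := by
  apply PySem.List.sorted_id_eq_of_perm_of_pairwise
  · -- permutation
    have p1 : (xs.filter (fun x => decide (x < pivot)) ++
        xs.filter (fun x => !decide (x < pivot))).Perm xs :=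
      List.filter_append_perm _ xs
    have e2 : (xs.filter (fun x => !decide (x < pivot))).filter (fun x => x == pivot) =
        xs.filter (fun x => x == pivot) := by
      rw [List.filter_filter]
      apply List.filter_congr
      intro x _
      by_cases hx : x = pivot <;> simp [hx]
    have e3 : (xs.filter (fun x => !decide (x < pivot))).filter (fun x => !(x == pivot)) =
        xs.filter (fun x => decide (pivot < x)) := by
      rw [List.filter_filter]
      apply List.filter_congr
      intro x _
      rcases lt_trichotomy x pivot with h | h | h <;> simp [h] <;> omega
    have p2 : (xs.filter (fun x => x == pivot) ++ xs.filter (fun x => decide (pivot < x))).Perm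
        (xs.filter (fun x => !decide (x < pivot))) := by
      have := List.filter_append_perm (fun x => x == pivot)
        (xs.filter (fun x => !decide (x < pivot)))
      rwa [e2, e3] at this
    have p3 : (xs.filter (fun x => decide (x < pivot)) ++
        (xs.filter (fun x => x == pivot) ++ xs.filter (fun x => decide (pivot < x)))).Perm xs :=
      ((p2.append_left _).trans p1)
    rw [List.append_assoc]
    exact List.Perm.trans
      ((PySem.List.sorted_perm _ _ _).append
        ((List.Perm.refl _).append (PySem.List.sorted_perm _ _ _))) p3
  · -- sortedness of the concatenation
    have hlt : ∀ a ∈ PySem.List.sorted (xs.filter (fun x => decide (x < pivot))) (fun x => x) false,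
        a < pivot := by
      intro a ha
      have := (List.mem_filter.mp ((PySem.List.mem_sorted _ _ _ _).mp ha)).2
      simpa using this
    have heq : ∀ a ∈ xs.filter (fun x => x == pivot), a = pivot := by
      intro a ha
      have := (List.mem_filter.mp ha).2
      simpa using this
    have hgt : ∀ a ∈ PySem.List.sorted (xs.filter (fun x => decide (pivot < x))) (fun x => x) false,
        pivot < a := by
      intro a ha
      have := (List.mem_filter.mp ((PySem.List.mem_sorted _ _ _ _).mp ha)).2
      simpa using this
    rw [List.pairwise_append, List.pairwise_append]
    refine ⟨⟨PySem.List.sorted_pairwise _ _, ?_, ?_⟩, PySem.List.sorted_pairwise _ _, ?_⟩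
    · exact List.pairwise_of_forall_mem_list (fun a ha b hb => by rw [heq a ha, heq b hb])
    · intro a ha b hb
      exact le_of_lt (lt_of_lt_of_le (hlt a ha) (le_of_eq (heq b hb).symm))
    · intro a ha b hb
      rcases List.mem_append.mp ha with h | h
      · exact le_of_lt (lt_trans (hlt a h) (hgt b hb))
      · exact le_of_lt (lt_of_le_of_lt (le_of_eq (heq a h)) (hgt b hb))

-- quickselect partial selection computes the sum of the k smallest = sum of sorted prefix
theorem sumSmallest_eq (xs : List Int) (k acc : Int) (hk : 0 ≤ k) :
    sumSmallest xs k acc =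
      acc + ((PySem.List.sorted xs (fun x => x) false).take k.toNat).sum := by
  induction xs, k, acc using sumSmallest.induct with
  | case1 xs k acc h =>
    have hk0 : k.toNat = 0 := by omega
    rw [sumSmallest, if_pos h, hk0]
    simp
  | case2 xs k acc h h2 =>
    rw [sumSmallest, if_neg h, if_pos h2]
    rw [List.take_of_length_le (by rw [PySem.List.length_sorted]; omega)]
    rw [(PySem.List.sorted_perm xs (fun x => x) false).sum_eq]
  | case3 xs k acc h h2 pivot lt h3 ih =>
    have hp : pivot = xs.getD (xs.length / 2) 0 := rfl
    have hlt : lt = xs.filter (fun x => decide (x < pivot)) := by simp [lt]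
    rw [sumSmallest]
    simp only [if_neg h, if_neg h2]
    rw [← hp, ← hlt, if_pos h3]
    have hsp := sorted_partition xs pivot
    rw [← hlt] at hsp
    rw [ih hk, hsp, List.append_assoc,
      List.take_append_of_le_length (by rw [PySem.List.length_sorted]; omega)]
  | case4 xs k acc h h2 pivot lt eq h3 h4 =>
    have hp : pivot = xs.getD (xs.length / 2) 0 := rfl
    have hlt : lt = xs.filter (fun x => decide (x < pivot)) := by simp [lt]
    have heq : eq = xs.filter (fun x => x == pivot) := by simp [eq]
    rw [sumSmallest]
    simp only [if_neg h, if_neg h2]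
    rw [← hp, ← hlt, ← heq, if_neg h3, if_pos h4]
    have hsp := sorted_partition xs pivot
    rw [← hlt, ← heq] at hsp
    have her := eq_filter_replicate xs pivot
    rw [← heq] at her
    have hml : (PySem.List.sorted lt (fun x => x) false).length = lt.length :=
      PySem.List.length_sorted _ _ _
    rw [hsp, List.append_assoc, List.take_append, List.take_append]
    rw [List.take_of_length_le (by rw [hml]; omega)]
    have hz : k.toNat - (PySem.List.sorted lt (fun x => x) false).length - eq.length = 0 := by
      rw [hml]; omega
    rw [hz, List.take_zero, her, List.take_replicate]
    have hmin1 : min (k.toNat - (PySem.List.sorted lt (fun x => x) false).length) eq.length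
        = k.toNat - lt.length := by rw [hml]; omega
    rw [hmin1]
    simp only [List.sum_append, List.sum_replicate, List.sum_nil, nsmul_eq_mul]
    rw [(PySem.List.sorted_perm lt (fun x => x) false).sum_eq]
    have hc : ((k.toNat - lt.length : ℕ) : ℤ) = k - lt.length := by omega
    rw [hc]
    ring
  | case5 xs k acc h h2 pivot lt eq gt h3 h4 ih =>
    have hp : pivot = xs.getD (xs.length / 2) 0 := rfl
    have hlt : lt = xs.filter (fun x => decide (x < pivot)) := by simp [lt]
    have heq : eq = xs.filter (fun x => x == pivot) := by simp [eq]
    have hgt : gt = xs.filter (fun x => decide (pivot < x)) := by simp [gt]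
    rw [sumSmallest]
    simp only [if_neg h, if_neg h2]
    rw [← hp, ← hlt, ← heq, ← hgt, if_neg h3, if_neg h4]
    have hsp := sorted_partition xs pivot
    rw [← hlt, ← heq, ← hgt] at hsp
    have hml : (PySem.List.sorted lt (fun x => x) false).length = lt.length :=
      PySem.List.length_sorted _ _ _
    rw [hsp, List.append_assoc, List.take_append, List.take_append]
    rw [List.take_of_length_le (by rw [hml]; omega)]
    rw [List.take_of_length_le (α := Int) (l := eq) (by rw [hml]; omega)]
    have hidx : k.toNat - (PySem.List.sorted lt (fun x => x) false).length - eq.length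
        = (k - lt.length - eq.length).toNat := by rw [hml]; omega
    rw [hidx, ih (by omega)]
    simp only [List.sum_append]
    rw [(PySem.List.sorted_perm lt (fun x => x) false).sum_eq]
    ring

-- the binary-search probe: sum of the first `val` sorted costs = quickselect sum
theorem probe_eq (c : List Int) (val : Int) (hv : 0 ≤ val) :
    (PySem.List.slice (PySem.List.sorted c (fun x => x) false) (some 0) (some val)).sum =
      sumSmallest c val 0 := by
  rw [sumSmallest_eq c val 0 hv]
  rw [PySem.List.slice_zero_start, PySem.List.slice_to _ hv]
  omega

-- the two binary-search loops agree (0 ≤ left keeps every probe value nonnegative)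
theorem loop_eq (Bl : List Int) (A : Int) (left right : Int) (ans : Option Int × Option Int)
    (hl : 0 ≤ left) : loopA Bl A left right ans = loopB Bl A left right ans := by
  rw [loopA, loopB]
  by_cases h : left ≤ right
  · simp only [dif_pos h]
    have hb := PySem.Int.floordiv_two_mid_bounds h
    have hv : 0 ≤ PySem.Int.floordiv (left + right) 2 := by omega
    have hs := probe_eq
      ((List.range Bl.length).map (fun i => Bl.getD i 0 +
        ((i : Int) + 1) * PySem.Int.floordiv (left + right) 2))
      (PySem.Int.floordiv (left + right) 2) hv
    by_cases hS : sumSmallest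
        ((List.range Bl.length).map (fun i => Bl.getD i 0 +
          ((i : Int) + 1) * PySem.Int.floordiv (left + right) 2))
        (PySem.Int.floordiv (left + right) 2) 0 ≤ A
    · have hh : helperA Bl (PySem.Int.floordiv (left + right) 2) A =
          (true, sumSmallest
            ((List.range Bl.length).map (fun i => Bl.getD i 0 +
              ((i : Int) + 1) * PySem.Int.floordiv (left + right) 2))
            (PySem.Int.floordiv (left + right) 2) 0) := by
        unfold helperA
        simp only [hs]
        rw [if_pos hS]
      simp only [hh, hS, if_pos]
      exact loop_eq Bl A _ right _ (by omega)
    · have hh : helperA Bl (PySem.Int.floordiv (left + right) 2) A = (false, -1) := by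
        unfold helperA
        simp only [hs]
        rw [if_neg hS]
      simp only [hh, Bool.false_eq_true, if_false]
      rw [if_neg hS]
      exact loop_eq Bl A left _ ans hl
  · simp only [dif_neg h]
termination_by (right + 1 - left).toNat
decreasing_by
  · have := PySem.Int.floordiv_two_mid_bounds h
    omega
  · have := PySem.Int.floordiv_two_mid_bounds h
    omega

-- ===== VERDICT (by name: the statement is the Claim_ definition above) =====
theorem solve_spec : Claim_equal_solve := by
  intro A B _
  unfold Spec_solve solve solve_alt
  rw [loop_eq _ _ _ _ _ le_rfl]
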